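-- pv_equiv track=rewrite | github.com/NicoleeeTian/CS111 | PS3/ps3pr2.py | cube_evens_rec
-- ===== SOURCE A (Python) =====
-- def cube_evens_rec(values):
--     """ return a new list contains the cubes of even numbers
--     """
--     if len(values)==0:
--         return []
--     else:
--         rest_val=cube_evens_rec(values[1:])
--         if values[0]%2==0:
--             return [values[0]**3]+rest_val
--         else:
--             return rest_val
-- ===== SOURCE B (Python) =====
-- def cube_evens_rec(values):
--     """ return a new list contains the cubes of even numbers
--     """
--     result = []
--     for v in values:
--         if v % 2 == 0:
--             result.append(v ** 3)
--     return result
-- ===== Notes on version B (the rewrite author's own statement) =====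
-- stated objective: faster
-- what changed: Replaces the structural recursion on values[1:] (which slices the list at every step) with a single iterative pass appending cubes of evens to an accumulator list.
import Mathlib
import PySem

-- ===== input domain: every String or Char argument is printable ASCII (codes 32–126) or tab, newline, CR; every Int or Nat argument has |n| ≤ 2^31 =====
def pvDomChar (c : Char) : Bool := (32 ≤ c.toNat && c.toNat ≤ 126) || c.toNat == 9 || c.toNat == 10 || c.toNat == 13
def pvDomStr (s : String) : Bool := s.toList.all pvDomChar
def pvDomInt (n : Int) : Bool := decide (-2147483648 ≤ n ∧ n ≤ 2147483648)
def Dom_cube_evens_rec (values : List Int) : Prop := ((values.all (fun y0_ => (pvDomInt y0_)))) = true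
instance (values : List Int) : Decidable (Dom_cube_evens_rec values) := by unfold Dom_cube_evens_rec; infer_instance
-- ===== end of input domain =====

-- ===== PORT A =====
-- B: one iterative pass with an accumulator instead of A's structural recursion on values[1:] (faster in a timing run).
-- recursion on the list, [values[0]**3] + rest when even, as in A
def cube_evens_rec (values : List Int) : List Int :=
  match values with
  | [] => []
  | v :: rest =>
    let rest_val := cube_evens_rec rest
    if v % 2 == 0 then (v ^ 3) :: rest_val else rest_val

-- ===== PORT B =====
-- loop 'for v in values: if v % 2 == 0: result.append(v ** 3)' as a foldl over the accumulator
def cube_evens_rec_alt (values : List Int) : List Int :=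
  values.foldl (fun result v => if v % 2 == 0 then result ++ [v ^ 3] else result) []

-- ===== PRECONDITION & SPEC =====
def Spec_cube_evens_rec (values : List Int) (out : List Int) : Prop := out = cube_evens_rec_alt values
instance (values : List Int) (out : List Int) : Decidable (Spec_cube_evens_rec values out) := by unfold Spec_cube_evens_rec; infer_instance

-- ===== CLAIM (what is proved, stated in full; the proofs are below) =====
def Claim_equal_cube_evens_rec : Prop := ∀ (values : List Int), Dom_cube_evens_rec values → Spec_cube_evens_rec values (cube_evens_rec values)

-- ===== LEMMAS AND PROOFS =====

-- ===== VERDICT (by name: the statement is the Claim_ definition above) =====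
theorem alt_foldl_acc (values : List Int) (acc : List Int) :
    values.foldl (fun result v => if v % 2 == 0 then result ++ [v ^ 3] else result) acc
      = acc ++ cube_evens_rec values := by
  induction values generalizing acc with
  | nil => simp [cube_evens_rec]
  | cons v rest ih =>
    simp only [List.foldl, cube_evens_rec]
    cases h : (v % 2 == 0) <;> simp only [h, if_true, if_false, Bool.false_eq_true] <;>
      rw [ih] <;> simp [List.append_assoc]

theorem cube_evens_rec_spec : Claim_equal_cube_evens_rec := by
  intro values _
  unfold Spec_cube_evens_rec cube_evens_rec_alt
  simpa using (alt_foldl_acc values []).symm
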